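-- pv_equiv track=rewrite | github.com/frozen-dumplings/algorithm-playground | QUADTREE/asdf.py | solve
-- ===== SOURCE A (Python) =====
-- def solve(s):
--     # Returns result, restString
--     if s[0] != 'x':
--         return s[0], s[1:]
--
--     subQuadtree = []
--     rest = s[1:]
--     for i in range(4):
--         tmp, rest = solve(rest)
--         subQuadtree.append(tmp)
--     results = ['x'] + subQuadtree[2:] + subQuadtree[:2]
--     return "".join(results), rest
-- ===== SOURCE B (Python) =====
-- def solve(s):
--     # Iterative shift-reduce stack machine: one left-to-right pass, no recursion.
--     # Each stack frame collects the (already rotated-serialized) children of an 'x' node.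
--     stack = []
--     i = 0
--     while True:
--         c = s[i]
--         i += 1
--         if c == 'x':
--             stack.append([])
--         else:
--             cur = c
--             while True:
--                 if not stack:
--                     return cur, s[i:]
--                 stack[-1].append(cur)
--                 if len(stack[-1]) == 4:
--                     k = stack.pop()
--                     cur = 'x' + k[2] + k[3] + k[0] + k[1]
--                 else:
--                     break
-- ===== Notes on version B (the rewrite author's own statement) =====
-- stated objective: alternative
-- what changed: A is a fused recursive descent that rotates while parsing; B is an iterative one-pass shift-reduce stack machine: it pushes a frame per 'x', appends completed children, and reduces a frame of 4 into 'x'+k[2]+k[3]+k[0]+k[1], returning when the stack empties.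
import Mathlib
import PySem

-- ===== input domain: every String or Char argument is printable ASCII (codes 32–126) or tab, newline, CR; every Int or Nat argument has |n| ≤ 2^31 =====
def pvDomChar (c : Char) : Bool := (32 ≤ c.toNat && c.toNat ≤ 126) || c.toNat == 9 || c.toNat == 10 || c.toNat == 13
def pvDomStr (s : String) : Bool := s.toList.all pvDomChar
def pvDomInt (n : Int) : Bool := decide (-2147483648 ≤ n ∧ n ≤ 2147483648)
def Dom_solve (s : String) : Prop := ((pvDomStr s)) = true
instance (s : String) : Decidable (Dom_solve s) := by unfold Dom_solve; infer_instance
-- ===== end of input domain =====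

-- B replaces A's fused recursive descent by an iterative one-pass shift-reduce
-- stack machine; objective: alternative (different algorithmic decomposition).

-- ===== PORT A =====
-- A's single recursive pass, fuel-totalized (fuel only makes the recursion total;
-- none = IndexError on a truncated string, excluded by Pre_solve).
def pA : Nat → List Char → Option (List Char × List Char)
  | 0, _ => none
  | _ + 1, [] => none
  | fuel + 1, c :: cs =>
    if c ≠ 'x' then some ([c], cs)
    else
      match pA fuel cs with
      | none => none
      | some (t0, r0) =>
        match pA fuel r0 with
        | none => none
        | some (t1, r1) =>
          match pA fuel r1 with
          | none => none
          | some (t2, r2) =>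
            match pA fuel r2 with
            | none => none
            | some (t3, r3) =>
              -- results = ['x'] + subQuadtree[2:] + subQuadtree[:2]; "".join
              some ('x' :: (t2 ++ t3 ++ t0 ++ t1), r3)

def solve (s : String) : String × String :=
  match pA (s.toList.length + 1) s.toList with
  | some (r, rest) => (String.ofList r, String.ofList rest)
  | none => ("", "")

-- ===== PORT B =====
-- inner while-loop: feed a completed subtree 'cur' into the stack, reducing
-- every frame that reaches 4 children; .inl = the whole tree is finished
def redB : List Char → List (List (List Char)) → (List Char) ⊕ (List (List (List Char)))
  | cur, [] => Sum.inl cur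
  | cur, f :: fs =>
    match f ++ [cur] with
    | [a, b, c, d] => redB ('x' :: (c ++ d ++ a ++ b)) fs
    | f' => Sum.inr (f' :: fs)

-- outer while-loop: one pass over the characters (structural recursion, no fuel;
-- none = IndexError when the characters run out, excluded by Pre_solve)
def loopB : List Char → List (List (List Char)) → Option (List Char × List Char)
  | [], _ => none
  | c :: cs, stack =>
    if c = 'x' then loopB cs ([] :: stack)
    else
      match redB [c] stack with
      | Sum.inl res => some (res, cs)
      | Sum.inr st' => loopB cs st'

def solve_alt (s : String) : String × String :=
  match loopB s.toList [] with
  | some (r, rest) => (String.ofList r, String.ofList rest)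
  | none => ("", "")

-- ===== PRECONDITION & SPEC =====
-- Both Pythons raise IndexError exactly when the string does not start with a
-- complete quadtree; Pre_ checks this by a counter scan (n = trees still to read).
def preGo : Nat → List Char → Bool
  | 0, _ => true
  | _ + 1, [] => false
  | n + 1, c :: cs => preGo (if c = 'x' then n + 4 else n) cs

def Pre_solve (s : String) : Prop := preGo 1 s.toList = true
instance (s : String) : Decidable (Pre_solve s) := by unfold Pre_solve; infer_instance

def pvWitness_solve : String := "xabcd"

def Spec_solve (s : String) (out : String × String) : Prop := out = solve_alt s
instance (s : String) (out : String × String) : Decidable (Spec_solve s out) := by unfold Spec_solve; infer_instance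

-- ===== CLAIM (what is proved, stated in full; the proofs are below) =====
def Claim_equal_solve : Prop := ∀ (s : String), Dom_solve s → Pre_solve s → Spec_solve s (solve s)

-- ===== LEMMAS AND PROOFS =====
-- one-step unfolding of A's port at an 'x'
theorem pA_x (n : Nat) (cs : List Char) :
    pA (n + 1) ('x' :: cs) =
      (match pA n cs with
      | none => none
      | some (t0, r0) =>
        match pA n r0 with
        | none => none
        | some (t1, r1) =>
          match pA n r1 with
          | none => none
          | some (t2, r2) =>
            match pA n r2 with
            | none => none
            | some (t3, r3) => some ('x' :: (t2 ++ t3 ++ t0 ++ t1), r3)) := by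
  simp [pA]

-- one-step reductions of the machine's inner while-loop
theorem red1 (t : List Char) (st : List (List (List Char))) :
    redB t ([] :: st) = Sum.inr ([t] :: st) := rfl
theorem red2 (t a : List Char) (st : List (List (List Char))) :
    redB t ([a] :: st) = Sum.inr ([a, t] :: st) := rfl
theorem red3 (t a b : List Char) (st : List (List (List Char))) :
    redB t ([a, b] :: st) = Sum.inr ([a, b, t] :: st) := rfl
theorem red4 (t a b c : List Char) (st : List (List (List Char))) :
    redB t ([a, b, c] :: st) = redB ('x' :: (c ++ t ++ a ++ b)) st := rfl

-- a successful parse consumes at least one character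
theorem pA_rest_lt (F : Nat) (l t r : List Char) (h : pA F l = some (t, r)) :
    r.length < l.length := by
  induction F generalizing l t r with
  | zero => simp [pA] at h
  | succ n ih =>
    cases l with
    | nil => simp [pA] at h
    | cons c cs =>
      by_cases hc : c = 'x'
      · subst hc
        rw [pA_x] at h
        cases h0 : pA n cs with
        | none => simp [h0] at h
        | some p0 =>
          obtain ⟨t0, r0⟩ := p0
          simp only [h0] at h
          cases h1 : pA n r0 with
          | none => simp [h1] at h
          | some p1 =>
            obtain ⟨t1, r1⟩ := p1
            simp only [h1] at h
            cases h2 : pA n r1 with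
            | none => simp [h2] at h
            | some p2 =>
              obtain ⟨t2, r2⟩ := p2
              simp only [h2] at h
              cases h3 : pA n r2 with
              | none => simp [h3] at h
              | some p3 =>
                obtain ⟨t3, r3⟩ := p3
                simp only [h3, Option.some.injEq, Prod.mk.injEq] at h
                obtain ⟨-, rfl⟩ := h
                have := ih _ _ _ h0
                have := ih _ _ _ h1
                have := ih _ _ _ h2
                have := ih _ _ _ h3
                simp only [List.length_cons]
                omega
      · simp only [pA, ne_eq, hc, not_false_eq_true, if_true,
          Option.some.injEq, Prod.mk.injEq] at h
        simp [← h.2]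

-- the machine, fed any stack, simulates A's recursion on the first complete tree
theorem loopB_sim (F : Nat) : ∀ (l : List Char), l.length < F → ∀ st,
    loopB l st =
      match pA F l with
      | none => none
      | some (t, r) =>
        match redB t st with
        | Sum.inl res => some (res, r)
        | Sum.inr st' => loopB r st' := by
  induction F with
  | zero => intro l h; omega
  | succ n ih =>
    intro l hl st
    cases l with
    | nil => simp [loopB, pA]
    | cons c cs =>
      by_cases hc : c = 'x'
      · subst hc
        have hcs : cs.length < n := by simp at hl; omega
        have L : loopB ('x' :: cs) st = loopB cs ([] :: st) := by simp [loopB]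
        rw [L, pA_x, ih cs hcs ([] :: st)]
        cases h0 : pA n cs with
        | none => rfl
        | some p0 =>
          obtain ⟨t0, r0⟩ := p0
          have hr0 : r0.length < n := lt_trans (pA_rest_lt n cs t0 r0 h0) hcs
          simp only [red1]
          rw [ih r0 hr0 ([t0] :: st)]
          cases h1 : pA n r0 with
          | none => rfl
          | some p1 =>
            obtain ⟨t1, r1⟩ := p1
            have hr1 : r1.length < n := lt_trans (pA_rest_lt n r0 t1 r1 h1) hr0
            simp only [red2]
            rw [ih r1 hr1 ([t0, t1] :: st)]
            cases h2 : pA n r1 with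
            | none => rfl
            | some p2 =>
              obtain ⟨t2, r2⟩ := p2
              have hr2 : r2.length < n := lt_trans (pA_rest_lt n r1 t2 r2 h2) hr1
              simp only [red3]
              rw [ih r2 hr2 ([t0, t1, t2] :: st)]
              cases h3 : pA n r2 with
              | none => rfl
              | some p3 =>
                obtain ⟨t3, r3⟩ := p3
                simp only [red4]
      · simp only [loopB, hc, if_false, pA, ne_eq, not_false_eq_true, if_true]

-- ===== VERDICT (by name: the statement is the Claim_ definition above) =====
theorem solve_spec : Claim_equal_solve := by
  intro s _ _
  unfold Spec_solve solve solve_alt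
  rw [loopB_sim (s.toList.length + 1) s.toList (by omega) []]
  cases h : pA (s.toList.length + 1) s.toList with
  | none => rfl
  | some p =>
    obtain ⟨t, r⟩ := p
    rfl
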